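-- pv_equiv track=rewrite | github.com/a03m06/JanCohort_PS5 | scores.py | get_matching_and_missing_skills
-- ===== SOURCE A (Python) =====
-- from typing import List, Tuple
--
-- def get_matching_and_missing_skills(
--     candidate_skills: List[str],
--     target_role: str,
--     target_skills: list
-- ) -> Tuple[List[str], List[str]]:
--
--     required_skills=set(target_skills)
--     candidate_set = {s for s in candidate_skills if s in required_skills}
--
--     matching = sorted(candidate_set & required_skills)
--     missing = sorted(required_skills - candidate_set)
--
--     return matching, missing
-- ===== SOURCE B (Python) =====
-- def get_matching_and_missing_skills(candidate_skills, target_role, target_skills):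
--     # Two-pointer merge over two sorted deduplicated lists; no membership tests.
--     req = sorted(set(target_skills))
--     cand = sorted(set(candidate_skills))
--     matching = []
--     missing = []
--     i = 0
--     j = 0
--     while i < len(req):
--         if j < len(cand) and cand[j] < req[i]:
--             j += 1
--         elif j < len(cand) and cand[j] == req[i]:
--             matching.append(req[i])
--             i += 1
--         else:
--             missing.append(req[i])
--             i += 1
--     return matching, missing
-- ===== Notes on version B (the rewrite author's own statement) =====
-- stated objective: alternative
-- what changed: Sorts both deduplicated lists and partitions the required skills by a two-pointer merge walk of the two sorted sequences, replacing A's hash-set membership algebra (& and -) followed by two sorts.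
import Mathlib
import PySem

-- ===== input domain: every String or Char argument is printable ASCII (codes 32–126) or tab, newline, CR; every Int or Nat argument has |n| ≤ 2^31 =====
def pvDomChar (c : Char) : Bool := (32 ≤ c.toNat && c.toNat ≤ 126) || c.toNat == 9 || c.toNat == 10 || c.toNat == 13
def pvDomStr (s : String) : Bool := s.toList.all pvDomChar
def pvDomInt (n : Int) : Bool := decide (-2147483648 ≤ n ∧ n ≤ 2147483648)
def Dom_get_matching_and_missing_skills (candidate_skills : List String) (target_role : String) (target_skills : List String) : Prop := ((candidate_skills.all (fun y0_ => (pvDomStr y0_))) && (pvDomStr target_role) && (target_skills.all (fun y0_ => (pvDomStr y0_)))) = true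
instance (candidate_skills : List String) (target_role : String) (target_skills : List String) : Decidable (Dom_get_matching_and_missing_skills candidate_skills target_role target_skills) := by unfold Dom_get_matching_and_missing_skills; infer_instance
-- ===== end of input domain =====

-- B replaces A's set-algebra (& and -) plus two sorts by a two-pointer merge of two sorted deduplicated lists (alternative decomposition, same cost).

-- ===== PORT A =====
-- Literal port of A: required = set(target_skills); candidate_set = {s for s in candidate_skills if s in required};
-- matching = sorted(candidate_set & required); missing = sorted(required - candidate_set).
def get_matching_and_missing_skills (candidate_skills : List String) (target_role : String) (target_skills : List String) : List String × List String :=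
  let required_skills : PySem.Set String := PySem.Set.ofList target_skills
  let candidate_set : PySem.Set String :=
    PySem.Set.ofList (candidate_skills.filter (fun s => PySem.Set.contains required_skills s))
  let matching := PySem.List.sorted (PySem.Set.inter candidate_set required_skills) (fun x => x) false
  let missing := PySem.List.sorted (PySem.Set.diff required_skills candidate_set) (fun x => x) false
  (matching, missing)

-- ===== PORT B =====
-- The while loop of B: two pointers over req and cand, advancing cand (drop its head) while its
-- head is smaller, otherwise consuming the head of req into matching or missing.
def pvLoopB : List String → List String → List String → List String → List String × List String
  | [], _, m, mi => (m, mi)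
  | r :: rs, c :: cands, m, mi =>
      if c < r then pvLoopB (r :: rs) cands m mi
      else if c == r then pvLoopB rs (c :: cands) (m ++ [r]) mi
      else pvLoopB rs (c :: cands) m (mi ++ [r])
  | r :: rs, [], m, mi => pvLoopB rs [] m (mi ++ [r])
termination_by req cand _ _ => req.length + cand.length

-- Port of B: req = sorted(set(target_skills)), cand = sorted(set(candidate_skills)); two-pointer merge.
def get_matching_and_missing_skills_alt (candidate_skills : List String) (target_role : String) (target_skills : List String) : List String × List String :=
  let req := PySem.List.sorted (PySem.Set.ofList target_skills) (fun x => x) false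
  let cand := PySem.List.sorted (PySem.Set.ofList candidate_skills) (fun x => x) false
  pvLoopB req cand [] []

-- ===== PRECONDITION & SPEC =====
def Spec_get_matching_and_missing_skills (candidate_skills : List String) (target_role : String) (target_skills : List String) (out : List String × List String) : Prop := out = get_matching_and_missing_skills_alt candidate_skills target_role target_skills
instance (candidate_skills : List String) (target_role : String) (target_skills : List String) (out : List String × List String) : Decidable (Spec_get_matching_and_missing_skills candidate_skills target_role target_skills out) := by unfold Spec_get_matching_and_missing_skills; infer_instance

-- ===== CLAIM =====
def Claim_equal_get_matching_and_missing_skills : Prop := ∀ (candidate_skills : List String) (target_role : String) (target_skills : List String), Dom_get_matching_and_missing_skills candidate_skills target_role target_skills → Spec_get_matching_and_missing_skills candidate_skills target_role target_skills (get_matching_and_missing_skills candidate_skills target_role target_skills)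

-- ===== LEMMAS AND PROOFS =====

-- On sorted inputs, the two-pointer merge partitions req into (∈ cand, ∉ cand), after the accumulators.
theorem pvLoopB_eq (req cand m mi : List String)
    (hreq : req.Pairwise (· < ·)) (hcand : cand.Pairwise (· < ·)) :
    pvLoopB req cand m mi
      = (m ++ req.filter (fun s => decide (s ∈ cand)),
         mi ++ req.filter (fun s => !decide (s ∈ cand))) := by
  induction req, cand, m, mi using pvLoopB.induct with
  | case1 cand m mi => simp [pvLoopB]
  | case2 r rs c cands m mi hlt ih =>
    have hne : ∀ x ∈ r :: rs, ¬ (x = c) := by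
      intro x hx hxc
      subst hxc
      rcases List.mem_cons.mp hx with h | h
      · rw [h] at hlt; exact lt_irrefl r hlt
      · have : r < x := (List.pairwise_cons.mp hreq).1 x h
        exact lt_irrefl x (lt_trans hlt this)
    have hcands : cands.Pairwise (· < ·) := (List.pairwise_cons.mp hcand).2
    rw [pvLoopB, if_pos hlt, ih hreq hcands]
    congr 1
    · congr 1
      apply List.filter_congr
      intro x hx
      simp [List.mem_cons, hne x hx]
    · congr 1
      apply List.filter_congr
      intro x hx
      simp [List.mem_cons, hne x hx]
  | case3 r rs c cands m mi hlt heq ih =>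
    have hceq : c = r := by simpa using heq
    have hrs : rs.Pairwise (· < ·) := (List.pairwise_cons.mp hreq).2
    rw [pvLoopB, if_neg hlt, if_pos heq, ih hrs hcand]
    subst hceq
    simp [List.append_assoc]
  | case4 r rs c cands m mi hlt hne ih =>
    have hceq : ¬ c = r := by simpa using hne
    have hrc : r < c := by
      rcases lt_trichotomy c r with h | h | h
      · exact absurd h hlt
      · exact absurd h hceq
      · exact h
    have hnmem : r ∉ c :: cands := by
      intro hx
      rcases List.mem_cons.mp hx with h | h
      · exact hceq h.symm
      · have : c < r := (List.pairwise_cons.mp hcand).1 r h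
        exact absurd (lt_trans hrc this) (lt_irrefl r)
    have hrs : rs.Pairwise (· < ·) := (List.pairwise_cons.mp hreq).2
    have hr1 : ¬ r = c := fun h => hceq h.symm
    have hr2 : r ∉ cands := fun h => hnmem (List.mem_cons_of_mem _ h)
    rw [pvLoopB, if_neg hlt, if_neg hne, ih hrs hcand]
    simp [hr1, hr2, List.append_assoc]
  | case5 r rs m mi ih =>
    have hrs : rs.Pairwise (· < ·) := (List.pairwise_cons.mp hreq).2
    rw [pvLoopB, ih hrs hcand]
    simp [List.append_assoc]

theorem get_matching_and_missing_skills_spec : Claim_equal_get_matching_and_missing_skills := by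
  intro cs tr ts _
  unfold Spec_get_matching_and_missing_skills
  unfold get_matching_and_missing_skills get_matching_and_missing_skills_alt
  simp only []
  rw [pvLoopB_eq _ _ _ _ (PySem.List.sorted_ofList_pairwise_lt ts)
      (PySem.List.sorted_ofList_pairwise_lt cs)]
  set L := PySem.List.sorted (PySem.Set.ofList ts) (fun x => x) false with hL
  have hmemL : ∀ x, x ∈ L ↔ x ∈ ts := by
    intro x; rw [hL, PySem.List.mem_sorted, PySem.Set.mem_ofList]
  have hpair : L.Pairwise (· < ·) := PySem.List.sorted_ofList_pairwise_lt ts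
  have hnodup : L.Nodup := hpair.imp ne_of_lt
  have hcand : ∀ x, (x ∈ PySem.List.sorted (PySem.Set.ofList cs) (fun x => x) false) ↔ x ∈ cs := by
    intro x; rw [PySem.List.mem_sorted, PySem.Set.mem_ofList]
  have hcand2 : ∀ x, (x ∈ PySem.Set.ofList (cs.filter
      (fun s => PySem.Set.contains (PySem.Set.ofList ts) s))) ↔ (x ∈ cs ∧ x ∈ ts) := by
    intro x
    rw [PySem.Set.mem_ofList, List.mem_filter, PySem.Set.contains_iff, PySem.Set.mem_ofList]
  refine Prod.ext ?_ ?_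
  · show PySem.List.sorted _ (fun x => x) false = [] ++ L.filter _
    rw [List.nil_append]
    apply PySem.List.sorted_eq_of_perm_of_pairwise_lt
    · rw [List.perm_ext_iff_of_nodup (hnodup.filter _)
        (PySem.Set.nodup_inter _ _ (PySem.Set.nodup_ofList _))]
      intro x
      rw [List.mem_filter, PySem.Set.mem_inter, hcand2, PySem.Set.mem_ofList, hmemL]
      simp [hcand x]
      tauto
    · exact hpair.sublist List.filter_sublist
  · show PySem.List.sorted _ (fun x => x) false = [] ++ L.filter _
    rw [List.nil_append]
    apply PySem.List.sorted_eq_of_perm_of_pairwise_lt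
    · rw [List.perm_ext_iff_of_nodup (hnodup.filter _)
        (PySem.Set.nodup_diff _ _ (PySem.Set.nodup_ofList _))]
      intro x
      simp only [List.mem_filter, PySem.Set.mem_diff, hcand2, PySem.Set.mem_ofList, hmemL,
        Bool.not_eq_eq_eq_not, Bool.not_true, Bool.eq_false_iff, ne_eq, decide_eq_true_eq]
      simp [hcand x]
      tauto
    · exact hpair.sublist List.filter_sublist
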